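-- pv_equiv track=rewrite | github.com/zeke8402/codingame-puzzles | medium/mars-lander-level-2/solution.py | findFlatLand
-- ===== SOURCE A (Python) =====
-- def findFlatLand(sortedPoints):
--     flatPoints = []
--     iterPoint = 0
--     for x, y in sortedPoints.items():
--         count = 0
--         for x2, y2 in sortedPoints.items():
--             if y2 == y and x2 != x and ((count - iterPoint) == 1):
--                 flatPoints.append(x+100)
--                 flatPoints.append(x2-100)
--                 break
--             count += 1
--         iterPoint += 1
--
--     return flatPoints
-- ===== SOURCE B (Python) =====
-- def findFlatLand(sortedPoints):
--     items = list(sortedPoints.items())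
--     flatPoints = []
--     for (x, y), (x2, y2) in zip(items, items[1:]):
--         if y == y2:
--             flatPoints += [x + 100, x2 - 100]
--     return flatPoints
-- ===== Notes on version B (the rewrite author's own statement) =====
-- stated objective: faster
-- what changed: Replaced the O(n^2) nested rescan (whose inner 'count - iterPoint == 1' test can only ever match the immediately following item) by a single pass over consecutive pairs checking equal y.
import Mathlib
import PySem

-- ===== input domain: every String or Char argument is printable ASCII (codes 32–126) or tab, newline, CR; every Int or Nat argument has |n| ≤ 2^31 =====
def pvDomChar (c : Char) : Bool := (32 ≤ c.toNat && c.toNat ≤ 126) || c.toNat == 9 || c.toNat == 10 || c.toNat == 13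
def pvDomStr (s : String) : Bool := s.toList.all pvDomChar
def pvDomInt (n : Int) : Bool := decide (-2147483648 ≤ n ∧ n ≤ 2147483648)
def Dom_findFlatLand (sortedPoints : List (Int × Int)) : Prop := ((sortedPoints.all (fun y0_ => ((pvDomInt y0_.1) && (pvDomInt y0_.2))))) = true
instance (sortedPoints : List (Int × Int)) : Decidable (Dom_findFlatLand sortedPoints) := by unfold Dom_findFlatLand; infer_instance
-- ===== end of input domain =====

-- B replaces A's O(n^2) nested rescan by a single pass over consecutive pairs (objective: faster).

-- ===== PORT A =====
-- inner 'for x2, y2 in sortedPoints.items(): … break' loop, with its running count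
def findFlatLandInner (x y iterPoint : Int) : List (Int × Int) → Int → List Int
  | [], _ => []
  | (x2, y2) :: rest, count =>
    if y2 = y ∧ x2 ≠ x ∧ count - iterPoint = 1 then [x + 100, x2 - 100]
    else findFlatLandInner x y iterPoint rest (count + 1)

-- outer 'for x, y in sortedPoints.items()' loop, with iterPoint and the flatPoints accumulator
def findFlatLandOuter (all : List (Int × Int)) : List (Int × Int) → Int → List Int → List Int
  | [], _, acc => acc
  | (x, y) :: rest, iterPoint, acc =>
    findFlatLandOuter all rest (iterPoint + 1) (acc ++ findFlatLandInner x y iterPoint all 0)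

def findFlatLand (sortedPoints : List (Int × Int)) : List Int :=
  findFlatLandOuter sortedPoints sortedPoints 0 []

-- ===== PORT B =====
-- single pass: zip(items, items[1:]) and keep the pairs with equal y
def findFlatLand_alt (sortedPoints : List (Int × Int)) : List Int :=
  (sortedPoints.zip sortedPoints.tail).foldl
    (fun acc p => if p.1.2 = p.2.2 then acc ++ [p.1.1 + 100, p.2.1 - 100] else acc) []

-- ===== PRECONDITION & SPEC =====
-- sortedPoints stands for a Python dict, so its keys (x-coordinates) are pairwise distinct.
def Pre_findFlatLand (sortedPoints : List (Int × Int)) : Prop :=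
  (sortedPoints.map Prod.fst).Nodup
instance (sortedPoints : List (Int × Int)) : Decidable (Pre_findFlatLand sortedPoints) := by
  unfold Pre_findFlatLand; infer_instance

def pvWitness_findFlatLand : (List (Int × Int)) := [(0, 5), (200, 5), (300, 7)]

def Spec_findFlatLand (sortedPoints : List (Int × Int)) (out : List Int) : Prop := out = findFlatLand_alt sortedPoints
instance (sortedPoints : List (Int × Int)) (out : List Int) : Decidable (Spec_findFlatLand sortedPoints out) := by unfold Spec_findFlatLand; infer_instance

-- ===== CLAIM (what is proved, stated in full; the proofs are below) =====
def Claim_equal_findFlatLand : Prop := ∀ (sortedPoints : List (Int × Int)), Dom_findFlatLand sortedPoints → Pre_findFlatLand sortedPoints → Spec_findFlatLand sortedPoints (findFlatLand sortedPoints)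

-- ===== LEMMAS AND PROOFS =====

-- once count has passed iterPoint + 1, the inner loop can never fire again
theorem innerPast (x y iterPoint : Int) :
    ∀ (l : List (Int × Int)) (count : Int), iterPoint + 1 < count →
      findFlatLandInner x y iterPoint l count = [] := by
  intro l
  induction l with
  | nil => intro count _; rfl
  | cons p rest ih =>
    intro count h
    obtain ⟨x2, y2⟩ := p
    simp only [findFlatLandInner]
    rw [if_neg (by rintro ⟨-, -, h2⟩; omega)]
    exact ih (count + 1) (by omega)

theorem innerPrefix (x y : Int) :
    ∀ (pre cur : List (Int × Int)) (c : Int),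
      findFlatLandInner x y (c + pre.length) (pre ++ cur) c =
        findFlatLandInner x y (c + pre.length) cur (c + pre.length) := by
  intro pre
  induction pre with
  | nil => intro cur c; simp
  | cons p rest ih =>
    intro cur c
    obtain ⟨x2, y2⟩ := p
    simp only [List.cons_append, findFlatLandInner, List.length_cons]
    rw [if_neg (by push_cast; omega)]
    have h := ih cur (c + 1)
    have e : c + 1 + (rest.length : Int) = c + ((rest.length : Int) + 1) := by ring
    rw [e] at h
    exact h

-- the accumulator of B's fold factors out
theorem altFoldAcc :
    ∀ (zs : List ((Int × Int) × (Int × Int))) (acc : List Int),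
      zs.foldl (fun acc p => if p.1.2 = p.2.2 then acc ++ [p.1.1 + 100, p.2.1 - 100] else acc) acc =
        acc ++ zs.foldl (fun acc p => if p.1.2 = p.2.2 then acc ++ [p.1.1 + 100, p.2.1 - 100] else acc) [] := by
  intro zs
  induction zs with
  | nil => intro acc; simp
  | cons z zs ih =>
    intro acc
    simp only [List.foldl_cons]
    rw [ih, ih (if z.1.2 = z.2.2 then [] ++ [z.1.1 + 100, z.2.1 - 100] else [])]
    split_ifs <;> simp

theorem outerEq :
    ∀ (cur pre : List (Int × Int)) (acc : List Int),
      (cur.map Prod.fst).Nodup →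
      findFlatLandOuter (pre ++ cur) cur (pre.length : Int) acc =
        acc ++ findFlatLand_alt cur := by
  intro cur
  induction cur with
  | nil => intro pre acc _; simp [findFlatLandOuter, findFlatLand_alt]
  | cons p rest ih =>
    intro pre acc hnd
    obtain ⟨x, y⟩ := p
    simp only [findFlatLandOuter]
    have hpref := innerPrefix x y pre ((x, y) :: rest) 0
    simp only [zero_add] at hpref
    rw [hpref]
    have hrec := ih (pre ++ [(x, y)]) (acc ++ findFlatLandInner x y (pre.length : Int) ((x, y) :: rest) (pre.length : Int))
      (by simpa using (List.Nodup.of_cons (by simpa using hnd)))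
    simp only [List.append_assoc, List.singleton_append, List.length_append, List.length_cons,
      List.length_nil] at hrec
    have e : ((pre.length : Int) + 1) = ((pre.length + (0 + 1) : Nat) : Int) := by push_cast; omega
    rw [e, hrec]
    -- now compute the inner result and B on the cons
    cases rest with
    | nil =>
      simp only [findFlatLandInner]
      rw [if_neg (by rintro ⟨-, hx, -⟩; exact hx rfl)]
      simp [findFlatLand_alt]
    | cons q rest2 =>
      obtain ⟨x2, y2⟩ := q
      have hx : x2 ≠ x := by
        simp only [List.map_cons, List.nodup_cons, List.mem_cons] at hnd
        exact fun h => hnd.1 (Or.inl h.symm)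
      simp only [findFlatLandInner]
      rw [if_neg (by rintro ⟨-, hx', -⟩; exact hx' rfl)]
      rw [show (pre.length : Int) + 1 - (pre.length : Int) = 1 by ring]
      by_cases hy : y2 = y
      · rw [if_pos ⟨hy, hx, rfl⟩]
        simp only [findFlatLand_alt, List.tail_cons, List.zip_cons_cons, List.foldl_cons]
        rw [if_pos hy.symm]
        conv_rhs => rw [altFoldAcc]
        simp
      · rw [if_neg (by rintro ⟨h, -⟩; exact hy h)]
        rw [innerPast x y (pre.length : Int) rest2 ((pre.length : Int) + 1 + 1) (by omega)]
        simp only [findFlatLand_alt, List.tail_cons, List.zip_cons_cons, List.foldl_cons]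
        rw [if_neg (fun h => hy h.symm)]
        simp

-- ===== VERDICT (by name: the statement is the Claim_ definition above) =====
theorem findFlatLand_spec : Claim_equal_findFlatLand := by
  intro sp _ hpre
  unfold Spec_findFlatLand findFlatLand
  have h := outerEq sp [] [] hpre
  simpa using h
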